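-- pv_equiv track=rewrite | github.com/DngBack/ClassifyRAG | classifyrag/postprocess_split.py | _partition_run
-- ===== SOURCE A (Python) =====
-- def _partition_run(n: int, allowed_lengths: list[int]) -> list[int]:
--     """Partition a run length into allowed chunk sizes via DP.
--
--     Preference: exact coverage; tie-break by fewer chunks.
--     Fallback to 1-page chunks if no exact partition is possible.
--     """
--     allowed = sorted(set(x for x in allowed_lengths if x > 0))
--     if not allowed:
--         return [1] * n
--     if n == 0:
--         return []
--
--     # dp[i] = best partition for i pages, or None
--     dp: list[list[int] | None] = [None] * (n + 1)
--     dp[0] = []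
--     for i in range(1, n + 1):
--         best: list[int] | None = None
--         for a in allowed:
--             if i - a >= 0 and dp[i - a] is not None:
--                 cand = dp[i - a] + [a]
--                 if best is None or len(cand) < len(best):
--                     best = cand
--         dp[i] = best
--     if dp[n] is not None:
--         return dp[n]  # exact
--     return [1] * n
-- ===== SOURCE B (Python) =====
-- def _partition_run(n: int, allowed_lengths: list[int]) -> list[int]:
--     """Same DP, but store only chunk counts + a parent-pointer (chosen chunk)
--     per length and reconstruct the partition once at the end."""
--     allowed = sorted(set(x for x in allowed_lengths if x > 0))
--     if not allowed:
--         return [1] * n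
--     if n <= 0:
--         return []
--     INF = n + 1
--     cnt = [INF] * (n + 1)
--     cnt[0] = 0
--     choice = [0] * (n + 1)
--     for i in range(1, n + 1):
--         for a in allowed:
--             if a > i:
--                 break
--             if cnt[i - a] + 1 < cnt[i]:
--                 cnt[i] = cnt[i - a] + 1
--                 choice[i] = a
--     if cnt[n] > n:
--         return [1] * n
--     out = []
--     i = n
--     while i:
--         out.append(choice[i])
--         i -= choice[i]
--     out.reverse()
--     return out
-- ===== Notes on version B (the rewrite author's own statement) =====
-- stated objective: faster
-- what changed: A's DP stores a full partition list per length (copying dp[i-a]+[a] for every candidate); B stores only a chunk count and a parent pointer per length and reconstructs the single result list once at the end.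
import Mathlib
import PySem

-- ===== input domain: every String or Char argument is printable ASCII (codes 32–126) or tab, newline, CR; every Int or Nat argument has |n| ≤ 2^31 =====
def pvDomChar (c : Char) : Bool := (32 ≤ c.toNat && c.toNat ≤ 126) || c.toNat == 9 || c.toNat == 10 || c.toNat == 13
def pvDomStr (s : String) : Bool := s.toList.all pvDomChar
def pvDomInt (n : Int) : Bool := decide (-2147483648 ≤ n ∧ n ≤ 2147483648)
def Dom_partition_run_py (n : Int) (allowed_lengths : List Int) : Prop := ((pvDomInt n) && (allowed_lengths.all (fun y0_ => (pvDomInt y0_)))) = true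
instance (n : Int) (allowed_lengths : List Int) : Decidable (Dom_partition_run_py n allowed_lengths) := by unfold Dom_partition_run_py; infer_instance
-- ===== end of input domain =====

-- B replaces A's DP over partial partition LISTS (each entry a copied list) by a DP over
-- chunk COUNTS with a parent pointer per length, reconstructing the partition once at the end.

-- ===== PORT A =====
-- allowed = sorted(set(x for x in allowed_lengths if x > 0))   (shared first line of A and B)
def pvAllowed (allowed_lengths : List Int) : List Int :=
  PySem.List.sorted (PySem.Set.ofList (allowed_lengths.filter (fun x => decide (0 < x)))) (fun x => x) false

-- body of A's inner 'for a in allowed' loop (dp read-only inside iteration i)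
def pvAStep (dp : List (Option (List Int))) (i : Int) (best : Option (List Int)) (a : Int) : Option (List Int) :=
  if 0 ≤ i - a ∧ (dp.getD (i - a).toNat none).isSome = true then   -- 'if i - a >= 0 and dp[i - a] is not None'
    let cand := (dp.getD (i - a).toNat none).getD [] ++ [a]
    if best = none ∨ cand.length < (best.getD []).length then some cand else best
  else best

def partition_run_py (n : Int) (allowed_lengths : List Int) : List Int :=
  let allowed := pvAllowed allowed_lengths
  if allowed = [] then List.replicate n.toNat 1   -- [1] * n  ([] for n ≤ 0)
  else if n = 0 then []
  else
    let dp0 : List (Option (List Int)) := (List.replicate (n+1).toNat none).set 0 (some [])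
    let dp := (PySem.List.pyRange 1 (n+1) 1).foldl
      (fun dp i => dp.set i.toNat (allowed.foldl (pvAStep dp i) none)) dp0
    match dp.getD n.toNat none with
    | some l => l
    | none => List.replicate n.toNat 1

-- ===== PORT B =====
-- B's inner loop: recursion over 'allowed' so that 'break' is an early return;
-- (ci, chi) is the pending value of (cnt[i], choice[i]), written back once after the loop
-- (the loop body only ever reads cnt at indices i-a < i, so this is the same computation).
def pvBInner (cnt : List Int) (i : Int) : List Int → Int × Int → Int × Int
  | [], s => s
  | a :: rest, (ci, chi) =>
    if i < a then (ci, chi)                       -- break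
    else
      let c := cnt.getD (i - a).toNat 0 + 1
      if c < ci then pvBInner cnt i rest (c, a) else pvBInner cnt i rest (ci, chi)

-- the while-loop reconstruction, fuel-bounded (the loop runs at most n times)
def pvRecon (choice : List Int) : Nat → Int → List Int → List Int
  | 0, _, out => out
  | fuel + 1, i, out =>
    if i = 0 then out
    else
      let c := choice.getD i.toNat 0
      pvRecon choice fuel (i - c) (out ++ [c])

def partition_run_py_alt (n : Int) (allowed_lengths : List Int) : List Int :=
  let allowed := pvAllowed allowed_lengths
  if allowed = [] then List.replicate n.toNat 1
  else if n ≤ 0 then []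
  else
    let cnt0 := (List.replicate (n+1).toNat (n+1)).set 0 0
    let choice0 := List.replicate (n+1).toNat (0 : Int)
    let st := (PySem.List.pyRange 1 (n+1) 1).foldl
      (fun (s : List Int × List Int) i =>
        let r := pvBInner s.1 i allowed (s.1.getD i.toNat 0, s.2.getD i.toNat 0)
        (s.1.set i.toNat r.1, s.2.set i.toNat r.2)) (cnt0, choice0)
    if n < st.1.getD n.toNat 0 then List.replicate n.toNat 1
    else (pvRecon st.2 n.toNat n []).reverse

-- ===== PRECONDITION & SPEC =====
-- Pre_ excludes exactly the inputs where A raises IndexError: n < 0 together with at least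
-- one positive allowed length (dp = [None]*(n+1) is then too short for dp[0] = []).
def Pre_partition_run_py (n : Int) (allowed_lengths : List Int) : Prop :=
  0 ≤ n ∨ ∀ x ∈ allowed_lengths, x ≤ 0
instance (n : Int) (allowed_lengths : List Int) : Decidable (Pre_partition_run_py n allowed_lengths) := by
  unfold Pre_partition_run_py; infer_instance
def pvWitness_partition_run_py : Int × List Int := (5, [2, 3])

def Spec_partition_run_py (n : Int) (allowed_lengths : List Int) (out : List Int) : Prop := out = partition_run_py_alt n allowed_lengths
instance (n : Int) (allowed_lengths : List Int) (out : List Int) : Decidable (Spec_partition_run_py n allowed_lengths out) := by unfold Spec_partition_run_py; infer_instance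

-- ===== CLAIM (what is proved, stated in full; the proofs are below) =====
def Claim_equal_partition_run_py : Prop := ∀ (n : Int) (allowed_lengths : List Int), Dom_partition_run_py n allowed_lengths → Pre_partition_run_py n allowed_lengths → Spec_partition_run_py n allowed_lengths (partition_run_py n allowed_lengths)

-- ===== LEMMAS AND PROOFS =====

-- generic getD/set/replicate bookkeeping
theorem pv_getD_set_ne {α : Type} (l : List α) (m j : Nat) (v d : α) (h : m ≠ j) :
    (l.set m v).getD j d = l.getD j d := by
  simp [List.getD, List.getElem?_set_ne h]

theorem pv_getD_set_self {α : Type} (l : List α) (m : Nat) (v d : α) (h : m < l.length) :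
    (l.set m v).getD m d = v := by
  simp [List.getD, h]

theorem pv_getD_replicate {α : Type} (m j : Nat) (v d : α) :
    (List.replicate m v).getD j d = if j < m then v else d := by
  simp [List.getD, List.getElem?_replicate]; split <;> simp

-- facts about the shared 'allowed' list
theorem pvAllowed_pos (al : List Int) : ∀ a ∈ pvAllowed al, 0 < a := by
  intro a ha
  have h := (PySem.List.mem_sorted _ _ _ _).1 ha
  have h2 := (PySem.Set.mem_ofList _ _).1 h
  exact of_decide_eq_true (List.mem_filter.1 h2).2

theorem pvAllowed_sorted (al : List Int) : (pvAllowed al).Pairwise (· ≤ ·) :=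
  PySem.List.sorted_pairwise _ _

theorem pvAllowed_ne_nil_pos {al : List Int} (h : pvAllowed al ≠ []) : ∃ x ∈ al, 0 < x := by
  rcases List.exists_mem_of_ne_nil _ h with ⟨a, ha⟩
  have h2 := (PySem.Set.mem_ofList _ _).1 ((PySem.List.mem_sorted _ _ _ _).1 ha)
  rcases List.mem_filter.1 h2 with ⟨hm, hp⟩
  exact ⟨a, hm, of_decide_eq_true hp⟩

-- "cnt[j] describes dp[j]" (what the inner loops read)
def pvAgree (n : Int) (dp : List (Option (List Int))) (cnt : List Int) (j : Nat) : Prop :=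
  match dp.getD j none with
  | none => cnt.getD j 0 = n + 1
  | some l => cnt.getD j 0 = (l.length : Int) ∧ (l.length : Int) ≤ (j : Int)

-- pvAgree plus the parent pointer choice[j]
def pvGood (n : Int) (dp : List (Option (List Int))) (cnt choice : List Int) (j : Nat) : Prop :=
  pvAgree n dp cnt j ∧
  ∀ l, dp.getD j none = some l → 0 < j →
    0 < choice.getD j 0 ∧ (choice.getD j 0).toNat ≤ j ∧
      ∃ pl, dp.getD (j - (choice.getD j 0).toNat) none = some pl ∧ l = pl ++ [choice.getD j 0]

-- invariant after the outer loops have processed i = 1..k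
def pvInv (n : Int) (k : Nat) (dp : List (Option (List Int))) (cnt choice : List Int) : Prop :=
  dp.length = n.toNat + 1 ∧ cnt.length = n.toNat + 1 ∧ choice.length = n.toNat + 1 ∧
  dp.getD 0 none = some [] ∧
  (∀ j, j ≤ k → pvGood n dp cnt choice j) ∧
  (∀ j, k < j → j ≤ n.toNat → dp.getD j none = none ∧ cnt.getD j 0 = n + 1)

-- relation between the two inner-loop states at index i
def pvR (n i : Int) (dp : List (Option (List Int))) (best : Option (List Int)) (s : Int × Int) : Prop :=
  match best with
  | none => s.1 = n + 1
  | some l => s.1 = (l.length : Int) ∧ (l.length : Int) ≤ i ∧ 0 < s.2 ∧ s.2 ≤ i ∧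
      ∃ pl, dp.getD (i - s.2).toNat none = some pl ∧ l = pl ++ [s.2]

theorem pv_foldA_gt (dp : List (Option (List Int))) (i : Int) (xs : List Int)
    (h : ∀ a ∈ xs, i < a) (best : Option (List Int)) :
    xs.foldl (pvAStep dp i) best = best := by
  induction xs generalizing best with
  | nil => rfl
  | cons a rest ih =>
    have ha := h a (List.mem_cons_self)
    simp only [List.foldl_cons, pvAStep]
    rw [if_neg (by intro hc; exact absurd hc.1 (by omega))]
    exact ih (fun b hb => h b (List.mem_cons_of_mem _ hb)) best

theorem pv_inner (n i : Int) (dp : List (Option (List Int))) (cnt : List Int)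
    (h1 : 1 ≤ i) (h2 : i ≤ n)
    (hA : ∀ j : Nat, (j : Int) < i → pvAgree n dp cnt j) :
    ∀ xs : List Int, (∀ a ∈ xs, 0 < a) → xs.Pairwise (· ≤ ·) →
    ∀ (best : Option (List Int)) (s : Int × Int), pvR n i dp best s →
    pvR n i dp (xs.foldl (pvAStep dp i) best) (pvBInner cnt i xs s) := by
  intro xs
  induction xs with
  | nil => intro _ _ best s hR; exact hR
  | cons a rest ih =>
    intro hpos hsort best s hR
    obtain ⟨ci, chi⟩ := s
    have hpos' : ∀ b ∈ rest, 0 < b := fun b hb => hpos b (List.mem_cons_of_mem _ hb)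
    have hsort' := List.Pairwise.of_cons hsort
    have hapos : 0 < a := hpos a (List.mem_cons_self)
    by_cases hbr : i < a
    · -- Python B breaks; every later element is ≥ a, so A's remaining steps are no-ops
      have hrest : ∀ b ∈ (a :: rest), i < b := by
        intro b hb
        rcases List.mem_cons.1 hb with rfl | hb
        · exact hbr
        · exact lt_of_lt_of_le hbr ((List.pairwise_cons.1 hsort).1 b hb)
      rw [pv_foldA_gt dp i _ hrest best]
      simp only [pvBInner, if_pos hbr]
      exact hR
    · have h0ia : (0:Int) ≤ i - a := by omega
      have hj'i : (((i - a).toNat : Nat) : Int) = i - a := Int.toNat_of_nonneg h0ia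
      have hAg := hA (i - a).toNat (by omega)
      unfold pvAgree at hAg
      simp only [List.foldl_cons, pvBInner, if_neg hbr]
      simp only [pvAStep]
      cases hdp : dp.getD (i - a).toNat none with
      | none =>
        rw [hdp] at hAg
        have hci_le : ci ≤ n + 1 := by
          cases best with
          | none => simp only [pvR] at hR; omega
          | some l => simp only [pvR] at hR; omega
        rw [if_neg (by intro hc; simp at hc)]
        rw [if_neg (by omega : ¬ (cnt.getD (i - a).toNat 0 + 1 < ci))]
        exact ih hpos' hsort' best (ci, chi) hR
      | some pl =>
        rw [hdp] at hAg
        obtain ⟨hcj, hlen⟩ := hAg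
        have hlen' : (pl.length : Int) ≤ i - a := by rw [hj'i] at hlen; exact hlen
        have hRnew : pvR n i dp (some (pl ++ [a])) (cnt.getD (i - a).toNat 0 + 1, a) := by
          simp only [pvR]
          refine ⟨by rw [hcj]; simp, by simp; omega, hapos, by omega, pl, hdp, rfl⟩
        rw [if_pos ⟨h0ia, rfl⟩]
        simp only [Option.getD_some]
        cases best with
        | none =>
          simp only [pvR] at hR
          have hup : cnt.getD (i - a).toNat 0 + 1 < ci := by rw [hcj, hR]; omega
          rw [if_pos hup, if_pos (Or.inl rfl)]
          exact ih hpos' hsort' (some (pl ++ [a])) (cnt.getD (i - a).toNat 0 + 1, a) hRnew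
        | some b =>
          simp only [pvR] at hR
          obtain ⟨hci, hble, rest'⟩ := hR
          by_cases hlt : (pl ++ [a]).length < b.length
          · have hup : cnt.getD (i - a).toNat 0 + 1 < ci := by
              rw [hcj, hci]; simp only [List.length_append, List.length_cons, List.length_nil] at hlt ⊢
              omega
            rw [if_pos hup, if_pos (Or.inr (by simpa using hlt))]
            exact ih hpos' hsort' (some (pl ++ [a])) (cnt.getD (i - a).toNat 0 + 1, a) hRnew
          · have hup : ¬ (cnt.getD (i - a).toNat 0 + 1 < ci) := by
              rw [hcj, hci]; simp only [List.length_append, List.length_cons, List.length_nil] at hlt ⊢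
              omega
            rw [if_neg hup, if_neg (by simp only [Option.getD_some]; simpa using hlt)]
            exact ih hpos' hsort' (some b) (ci, chi) (by exact ⟨hci, hble, rest'⟩)

-- one iteration of the outer loops preserves the invariant
theorem pv_step (n : Int) (al : List Int) (k : Nat) (dp : List (Option (List Int))) (cnt choice : List Int)
    (hk : (k : Int) + 1 ≤ n) (hInv : pvInv n k dp cnt choice) :
    pvInv n (k+1)
      (dp.set (k+1) ((pvAllowed al).foldl (pvAStep dp ((k:Int)+1)) none))
      (cnt.set (k+1) (pvBInner cnt ((k:Int)+1) (pvAllowed al) (cnt.getD (k+1) 0, choice.getD (k+1) 0)).1)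
      (choice.set (k+1) (pvBInner cnt ((k:Int)+1) (pvAllowed al) (cnt.getD (k+1) 0, choice.getD (k+1) 0)).2) := by
  obtain ⟨hdl, hcl, hhl, h0, hgood, hun⟩ := hInv
  have hkN : k + 1 ≤ n.toNat := by omega
  set r := pvBInner cnt ((k:Int)+1) (pvAllowed al) (cnt.getD (k+1) 0, choice.getD (k+1) 0) with hr
  set bf := (pvAllowed al).foldl (pvAStep dp ((k:Int)+1)) none with hbf
  have hcnt_init : cnt.getD (k+1) 0 = n + 1 := (hun (k+1) (by omega) hkN).2
  have hR0 : pvR n ((k:Int)+1) dp none (cnt.getD (k+1) 0, choice.getD (k+1) 0) := by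
    simp only [pvR]
    exact hcnt_init
  have hAgree : ∀ j : Nat, (j:Int) < (k:Int)+1 → pvAgree n dp cnt j := by
    intro j hj
    exact (hgood j (by omega)).1
  have hRfin := pv_inner n ((k:Int)+1) dp cnt (by omega) (by omega) hAgree (pvAllowed al)
      (pvAllowed_pos al) (pvAllowed_sorted al) none _ hR0
  rw [← hbf, ← hr] at hRfin
  refine ⟨by simp [hdl], by simp [hcl], by simp [hhl], ?_, ?_, ?_⟩
  · rw [pv_getD_set_ne _ _ _ _ _ (by omega)]; exact h0
  · intro j hj
    rcases Nat.lt_or_ge j (k+1) with hlt | hge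
    · -- old entries are untouched
      have hg := hgood j (by omega)
      constructor
      · unfold pvAgree at hg ⊢
        rw [pv_getD_set_ne _ _ _ _ _ (by omega), pv_getD_set_ne _ _ _ _ _ (by omega)]
        exact hg.1
      · intro l hdl' hjpos
        rw [pv_getD_set_ne _ _ _ _ _ (by omega)] at hdl'
        rw [pv_getD_set_ne _ _ _ _ _ (by omega)]
        obtain ⟨hc1, hc2, pl, hpl, hplE⟩ := hg.2 l hdl' hjpos
        exact ⟨hc1, hc2, pl, by
          rw [pv_getD_set_ne _ _ _ _ _ (by omega)]; exact hpl, hplE⟩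
    · -- the fresh entry j = k+1
      have hj1 : j = k+1 := by omega
      subst hj1
      have hset_dp := pv_getD_set_self dp (k+1) bf none (by omega)
      have hset_cnt := pv_getD_set_self cnt (k+1) r.1 0 (by omega)
      have hset_cho := pv_getD_set_self choice (k+1) r.2 0 (by omega)
      cases hbest : bf with
      | none =>
        rw [hbest] at hRfin hset_dp
        simp only [pvR] at hRfin
        constructor
        · unfold pvAgree
          rw [hset_dp, hset_cnt, hRfin]
        · intro l hdl' _
          rw [hset_dp] at hdl'
          exact absurd hdl' (by simp)
      | some l =>
        rw [hbest] at hRfin hset_dp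
        simp only [pvR] at hRfin
        obtain ⟨hc1, hc2, hc3, hc4, pl, hpl, hplE⟩ := hRfin
        constructor
        · unfold pvAgree
          rw [hset_dp, hset_cnt, hc1]
          exact ⟨rfl, by push_cast; omega⟩
        · intro l' hdl' _
          rw [hset_dp] at hdl'
          injection hdl' with hll'
          subst hll'
          rw [hset_cho]
          refine ⟨hc3, by omega, pl, ?_, hplE⟩
          have hidx : (k + 1) - (r.2).toNat = (((k:Int)+1) - r.2).toNat := by omega
          rw [hidx, pv_getD_set_ne _ _ _ _ _ (by omega)]
          exact hpl
  · intro j hj hjN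
    have h1 := hun j (by omega) hjN
    rw [pv_getD_set_ne _ _ _ _ _ (by omega), pv_getD_set_ne _ _ _ _ _ (by omega)]
    exact h1

-- the outer-loop states of the two ports, as functions of the number k of processed indices
def pvStA (al : List Int) (n : Int) (k : Nat) : List (Option (List Int)) :=
  (PySem.List.pyRange 1 ((k:Int)+1) 1).foldl
    (fun dp i => dp.set i.toNat ((pvAllowed al).foldl (pvAStep dp i) none))
    ((List.replicate (n+1).toNat none).set 0 (some []))

def pvStB (al : List Int) (n : Int) (k : Nat) : List Int × List Int :=
  (PySem.List.pyRange 1 ((k:Int)+1) 1).foldl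
    (fun (s : List Int × List Int) i =>
      let r := pvBInner s.1 i (pvAllowed al) (s.1.getD i.toNat 0, s.2.getD i.toNat 0)
      (s.1.set i.toNat r.1, s.2.set i.toNat r.2))
    ((List.replicate (n+1).toNat (n+1)).set 0 0, List.replicate (n+1).toNat (0:Int))

theorem pvStA_succ (al : List Int) (n : Int) (k : Nat) :
    pvStA al n (k+1) = (pvStA al n k).set (k+1)
      ((pvAllowed al).foldl (pvAStep (pvStA al n k) ((k:Int)+1)) none) := by
  unfold pvStA
  rw [show (((k+1 : Nat) : Int) + 1) = ((k:Int)+1) + 1 by push_cast; ring,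
      PySem.List.pyRange_one_succ_right (by omega : (1:Int) ≤ (k:Int)+1), List.foldl_append]
  simp only [List.foldl_cons, List.foldl_nil]
  have ht : ((k:Int)+1).toNat = k+1 := by omega
  rw [ht]

theorem pvStB_succ (al : List Int) (n : Int) (k : Nat) :
    pvStB al n (k+1) =
      ((pvStB al n k).1.set (k+1)
        (pvBInner (pvStB al n k).1 ((k:Int)+1) (pvAllowed al)
          ((pvStB al n k).1.getD (k+1) 0, (pvStB al n k).2.getD (k+1) 0)).1,
       (pvStB al n k).2.set (k+1)
        (pvBInner (pvStB al n k).1 ((k:Int)+1) (pvAllowed al)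
          ((pvStB al n k).1.getD (k+1) 0, (pvStB al n k).2.getD (k+1) 0)).2) := by
  unfold pvStB
  rw [show (((k+1 : Nat) : Int) + 1) = ((k:Int)+1) + 1 by push_cast; ring,
      PySem.List.pyRange_one_succ_right (by omega : (1:Int) ≤ (k:Int)+1), List.foldl_append]
  simp only [List.foldl_cons, List.foldl_nil]
  have ht : ((k:Int)+1).toNat = k+1 := by omega
  rw [ht]

theorem pv_inv_all (al : List Int) (n : Int) (hn : 1 ≤ n) :
    ∀ k, k ≤ n.toNat → pvInv n k (pvStA al n k) (pvStB al n k).1 (pvStB al n k).2 := by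
  intro k
  induction k with
  | zero =>
    intro _
    have hnil : PySem.List.pyRange 1 (((0:Nat):Int)+1) 1 = [] :=
      PySem.List.pyRange_one_eq_nil (by norm_num)
    have hA0 : pvStA al n 0 = (List.replicate (n+1).toNat none).set 0 (some []) := by
      simp only [pvStA, hnil, List.foldl_nil]
    have hB0 : pvStB al n 0 =
        ((List.replicate (n+1).toNat (n+1)).set 0 0, List.replicate (n+1).toNat (0:Int)) := by
      simp only [pvStB, hnil, List.foldl_nil]
    have hlrep : ((List.replicate (n+1).toNat (none : Option (List Int)))).length = (n+1).toNat := by simp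
    have hD0 : (pvStA al n 0).getD 0 none = some [] := by
      rw [hA0]; exact pv_getD_set_self _ 0 (some []) none (by simp; omega)
    have hC0 : (pvStB al n 0).1.getD 0 0 = 0 := by
      rw [hB0]; exact pv_getD_set_self _ 0 0 0 (by simp; omega)
    refine ⟨?_, ?_, ?_, hD0, ?_, ?_⟩
    · rw [hA0]; simp; omega
    · rw [hB0]; simp; omega
    · rw [hB0]; simp; omega
    · intro j hj
      interval_cases j
      constructor
      · unfold pvAgree
        rw [hD0, hC0]
        norm_num
      · intro l _ h; omega
    · intro j hj hjN
      constructor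
      · rw [hA0, pv_getD_set_ne _ _ _ _ _ (by omega), pv_getD_replicate]
        split <;> rfl
      · rw [hB0]
        show ((List.replicate (n+1).toNat (n+1)).set 0 0).getD j 0 = n + 1
        rw [pv_getD_set_ne _ _ _ _ _ (by omega), pv_getD_replicate, if_pos (by omega)]
  | succ k ih =>
    intro hk1
    have hInv := ih (by omega)
    have := pv_step n al k (pvStA al n k) (pvStB al n k).1 (pvStB al n k).2 (by omega) hInv
    rw [pvStA_succ, pvStB_succ]
    exact this

-- reconstruction: following the parent pointers from j rebuilds dp[j]
theorem pv_recon (n : Int) (dp : List (Option (List Int))) (cnt choice : List Int)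
    (hInv : pvInv n n.toNat dp cnt choice) :
    ∀ j : Nat, j ≤ n.toNat → ∀ l, dp.getD j none = some l → ∀ fuel : Nat, l.length ≤ fuel →
    ∀ acc : List Int, pvRecon choice fuel (j:Int) acc = acc ++ l.reverse := by
  intro j
  induction j using Nat.strong_induction_on with
  | _ j ih =>
    intro hj l hl fuel hf acc
    match j with
    | 0 =>
      have h0 := hInv.2.2.2.1
      rw [hl] at h0
      injection h0 with h0
      subst h0
      cases fuel with
      | zero => simp [pvRecon]
      | succ f => simp [pvRecon]
    | (m+1) =>
      obtain ⟨hc1, hc2, pl, hpl, hplE⟩ :=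
        (hInv.2.2.2.2.1 (m+1) hj).2 l hl (by omega)
      have hlen : l.length = pl.length + 1 := by rw [hplE]; simp
      cases fuel with
      | zero => omega
      | succ f =>
        have hne : ¬ (((m+1 : Nat):Int) = 0) := by omega
        simp only [pvRecon, if_neg hne]
        have htn : (((m+1 : Nat):Int)).toNat = m + 1 := by omega
        rw [htn]
        have hidx : ((m+1 : Nat):Int) - choice.getD (m+1) 0
            = (((m+1) - (choice.getD (m+1) 0).toNat : Nat) : Int) := by omega
        rw [hidx, ih ((m+1) - (choice.getD (m+1) 0).toNat) (by omega) (by omega) pl hpl f (by omega)]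
        rw [hplE]
        simp

-- the main case: some positive allowed length, n ≥ 1
theorem pv_main (n : Int) (al : List Int) (h1 : pvAllowed al ≠ []) (h2 : 1 ≤ n) :
    partition_run_py n al = partition_run_py_alt n al := by
  have hcast : ((n.toNat : Nat) : Int) = n := Int.toNat_of_nonneg (by omega)
  have hInv := pv_inv_all al n h2 n.toNat (le_refl _)
  have hA : partition_run_py n al =
      (match (pvStA al n n.toNat).getD n.toNat none with
       | some l => l
       | none => List.replicate n.toNat 1) := by
    simp only [partition_run_py, if_neg h1, if_neg (by omega : ¬ n = 0)]
    have : PySem.List.pyRange 1 (n+1) 1 = PySem.List.pyRange 1 (((n.toNat : Nat):Int)+1) 1 := by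
      rw [hcast]
    rw [this]
    rfl
  have hB : partition_run_py_alt n al =
      (if n < (pvStB al n n.toNat).1.getD n.toNat 0 then List.replicate n.toNat 1
       else (pvRecon (pvStB al n n.toNat).2 n.toNat n []).reverse) := by
    simp only [partition_run_py_alt, if_neg h1, if_neg (by omega : ¬ n ≤ 0)]
    have : PySem.List.pyRange 1 (n+1) 1 = PySem.List.pyRange 1 (((n.toNat : Nat):Int)+1) 1 := by
      rw [hcast]
    rw [this]
    rfl
  rw [hA, hB]
  have hgood := (hInv.2.2.2.2.1 n.toNat (le_refl _)).1
  unfold pvAgree at hgood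
  cases hdp : (pvStA al n n.toNat).getD n.toNat none with
  | none =>
    rw [hdp] at hgood
    rw [if_pos (by omega)]
  | some l =>
    rw [hdp] at hgood
    obtain ⟨hcnt, hlen⟩ := hgood
    rw [if_neg (by omega)]
    have hrec := pv_recon n (pvStA al n n.toNat) (pvStB al n n.toNat).1 (pvStB al n n.toNat).2 hInv
      n.toNat (le_refl _) l hdp n.toNat (by omega) []
    rw [hcast] at hrec
    rw [hrec]
    simp

-- ===== VERDICT (by name: the statement is the Claim_ definition above) =====
theorem partition_run_py_spec : Claim_equal_partition_run_py := by
  unfold Claim_equal_partition_run_py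
  intro n al _ hPre
  unfold Spec_partition_run_py
  by_cases hA0 : pvAllowed al = []
  · simp only [partition_run_py, partition_run_py_alt, if_pos hA0]
  · have hex := pvAllowed_ne_nil_pos hA0
    have hn0 : 0 ≤ n := by
      rcases hPre with h | h
      · exact h
      · obtain ⟨x, hx, hxp⟩ := hex
        exact absurd (h x hx) (by omega)
    by_cases hn : n = 0
    · subst hn
      simp only [partition_run_py, partition_run_py_alt, if_neg hA0]
      norm_num
    · exact pv_main n al hA0 (by omega)
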